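-- pv_equiv track=rewrite | github.com/LucasCerqueira1244/Trabalho-estrutura-de-dados | main.py | num_operacoes
-- ===== SOURCE A (Python) =====
-- def num_operacoes(n):
--     matriz = [[1] * n for _ in range(n)]
--     posicao = []
--     for i, linha in enumerate(matriz):
--         for j, valor in enumerate(linha):
--             posicao.append((valor, (i, j)))
--     posicao_ordem = sorted(posicao)
--     cont_1 = sum(linha.count(1) for linha in matriz)
--     soma_1 = 1 * cont_1
--     cont_2 = matriz.count(2)
--     soma_2 = 2 * cont_2
--     cont_4 = matriz.count(4)
--     soma_4 = 4 * cont_4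
--     return cont_1 + cont_2 + cont_4
-- ===== SOURCE B (Python) =====
-- def num_operacoes(n):
--     # Closed form: the function just counts the ones in the n-by-n matrix,
--     # i.e. len(range(n)) squared (empty range for non-positive n,
--     # TypeError for non-int n, exactly as A's range does).
--     return len(range(n)) ** 2
-- ===== Notes on version B (the rewrite author's own statement) =====
-- stated objective: simpler
-- what changed: Replaces the quadratic matrix construction, tuple collection, sort and counting with the closed form len(range(n))**2, which equals the count A returns for every int n (including non-positive n, where the range is empty).
import Mathlib
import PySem

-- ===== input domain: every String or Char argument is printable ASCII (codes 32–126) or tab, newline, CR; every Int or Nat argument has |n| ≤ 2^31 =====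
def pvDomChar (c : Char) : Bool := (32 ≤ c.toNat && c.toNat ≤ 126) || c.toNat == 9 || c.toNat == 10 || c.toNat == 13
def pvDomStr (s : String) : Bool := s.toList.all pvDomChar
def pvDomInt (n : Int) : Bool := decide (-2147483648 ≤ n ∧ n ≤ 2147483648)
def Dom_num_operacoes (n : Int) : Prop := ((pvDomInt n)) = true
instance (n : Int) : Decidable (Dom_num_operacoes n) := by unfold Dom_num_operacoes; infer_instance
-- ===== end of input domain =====

-- B replaces A's dead n×n matrix build/sort/counting with the closed form len(range(n))**2 (simpler, same value).

-- ===== PORT A =====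
def num_operacoes (n : Int) : Int :=
  -- matriz = [[1] * n for _ in range(n)]  ([1]*n is empty for n ≤ 0, exactly List.replicate n.toNat)
  let matriz : List (List Int) := (PySem.List.pyRange 0 n 1).map (fun _ => List.replicate n.toNat 1)
  -- the double 'for … in enumerate' building posicao
  let posicao : List (Int × (Int × Int)) :=
    (PySem.List.enumerate matriz 0).foldl (fun acc il =>
      (PySem.List.enumerate il.2 0).foldl (fun acc2 jv => acc2 ++ [(jv.2, ((il.1 : Int), (jv.1 : Int)))]) acc) []
  -- posicao_ordem = sorted(posicao); keyed on the first tuple component, exact here since every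
  -- first component is 1 and PySem.List.sorted is stable (value unused anyway)
  let _posicao_ordem := PySem.List.sorted posicao (fun p => p.1) false
  let cont_1 : Int := (matriz.map (fun linha => (PySem.List.count linha 1 : Int))).sum
  let _soma_1 : Int := 1 * cont_1
  -- matriz.count(2): Python compares a list with an int, always False — countP of a false predicate, exact
  let cont_2 : Int := (matriz.countP (fun _ => false) : Int)
  let _soma_2 : Int := 2 * cont_2
  let cont_4 : Int := (matriz.countP (fun _ => false) : Int)
  let _soma_4 : Int := 4 * cont_4
  cont_1 + cont_2 + cont_4

-- ===== PORT B =====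
def num_operacoes_alt (n : Int) : Int := ((PySem.List.pyRange 0 n 1).length : Int) ^ 2

-- ===== PRECONDITION & SPEC =====
def Spec_num_operacoes (n : Int) (out : Int) : Prop := out = num_operacoes_alt n
instance (n : Int) (out : Int) : Decidable (Spec_num_operacoes n out) := by unfold Spec_num_operacoes; infer_instance

-- ===== CLAIM (what is proved, stated in full; the proofs are below) =====
def Claim_equal_num_operacoes : Prop := ∀ (n : Int), Dom_num_operacoes n → Spec_num_operacoes n (num_operacoes n)

-- ===== LEMMAS AND PROOFS =====

-- ===== VERDICT (by name: the statement is the Claim_ definition above) =====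
theorem num_operacoes_spec : Claim_equal_num_operacoes := by
  intro n _
  unfold Spec_num_operacoes num_operacoes num_operacoes_alt
  simp [PySem.List.count, List.count_replicate, List.countP_eq_length_filter,
        PySem.List.sum_map_const_int]
  ring
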